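-- pv_equiv track=rewrite | github.com/hye0e/Algorithm | dev/src/python/Prgmer0429.py | solution
-- ===== SOURCE A (Python) =====
-- def solution(array, commands):
--     answer = []
--     tmp = array
--     for command in commands:
--         array = array[int(command[0])-1:command[1]]
--         array.sort()
--         answer.append(array[int(command[2])-1])
--         array = tmp
--     return answer
-- ===== SOURCE B (Python) =====
-- import heapq
--
-- def solution(array, commands):
--     # k-th smallest of each slice via a size-k heap instead of a full sort
--     return [heapq.nsmallest(c[2], array[c[0] - 1:c[1]])[-1] for c in commands]
-- ===== Notes on version B (the rewrite author's own statement) =====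
-- stated objective: alternative
-- what changed: Each command's answer is computed as the k-th smallest of the slice via heapq.nsmallest (partial selection with a size-k heap) in a single comprehension, instead of mutating and fully sorting a copy then indexing; Pre_ excludes commands with a non-positive k, where A's value comes from accidental Python negative indexing into the sorted slice and B raises.
-- outside the precondition, e.g. on solution([1, 2, 3], [[1, 3, 0]]): A returns [3], B raises IndexError
import Mathlib
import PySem

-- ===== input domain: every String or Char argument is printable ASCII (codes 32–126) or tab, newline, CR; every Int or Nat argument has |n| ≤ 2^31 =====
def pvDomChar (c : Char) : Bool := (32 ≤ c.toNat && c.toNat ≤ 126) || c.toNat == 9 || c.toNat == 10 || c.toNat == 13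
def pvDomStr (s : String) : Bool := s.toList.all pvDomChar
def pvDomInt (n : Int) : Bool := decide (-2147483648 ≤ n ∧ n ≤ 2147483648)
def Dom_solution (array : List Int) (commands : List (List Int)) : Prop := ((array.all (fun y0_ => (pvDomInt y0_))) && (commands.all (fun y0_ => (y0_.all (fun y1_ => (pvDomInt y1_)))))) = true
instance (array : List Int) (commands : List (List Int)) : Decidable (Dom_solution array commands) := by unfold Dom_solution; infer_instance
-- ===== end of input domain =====

-- B replaces the mutate-sort-index loop by a partial selection (heapq.nsmallest) per command; same return values on Pre_.

-- ===== PORT A =====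
def solution (array : List Int) (commands : List (List Int)) : List Int :=
  let tmp := array
  let st := commands.foldl (fun (st : List Int × List Int) command =>
      let arr := PySem.List.slice st.2 (some (PySem.List.pyGetD command 0 0 - 1))
                                       (some (PySem.List.pyGetD command 1 0))
      let arr := PySem.List.sorted arr (fun x => x) false
      let answer := st.1 ++ [PySem.List.pyGetD arr (PySem.List.pyGetD command 2 0 - 1) 0]
      (answer, tmp)) ([], array)
  st.1

-- ===== PORT B =====
-- heapq.nsmallest(k, xs): ported by its documented contract sorted(xs)[:k] (negative k clamps to 0, as in Python)
def nsmallestInt (k : Int) (xs : List Int) : List Int :=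
  (PySem.List.sorted xs (fun x => x) false).take k.toNat

def solution_alt (array : List Int) (commands : List (List Int)) : List Int :=
  commands.map (fun c =>
    PySem.List.pyGetD
      (nsmallestInt (PySem.List.pyGetD c 2 0)
        (PySem.List.slice array (some (PySem.List.pyGetD c 0 0 - 1))
                                (some (PySem.List.pyGetD c 1 0)))) (-1) 0)

-- ===== PRECONDITION & SPEC =====
-- Pre_ excludes inputs where A raises (a command with fewer than 3 entries, or a selection index
-- past the slice: IndexError) and also commands with k = command[2] ≤ 0 on which A still returns a
-- value: there A's result comes from accidental Python negative indexing into the sorted slice, and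
-- B's natural nsmallest selection raises instead.
def Pre_solution (array : List Int) (commands : List (List Int)) : Prop :=
  ∀ c ∈ commands, 3 ≤ c.length ∧ 1 ≤ PySem.List.pyGetD c 2 0 ∧
    PySem.List.pyGetD c 2 0 ≤ ((PySem.List.slice array (some (PySem.List.pyGetD c 0 0 - 1))
                                               (some (PySem.List.pyGetD c 1 0))).length : Int)
instance (array : List Int) (commands : List (List Int)) : Decidable (Pre_solution array commands) := by unfold Pre_solution; infer_instance
def pvWitness_solution : List Int × List (List Int) := ([3, 1, 2, 5], [[1, 3, 2], [2, 4, 3]])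

def Spec_solution (array : List Int) (commands : List (List Int)) (out : List Int) : Prop := out = solution_alt array commands
instance (array : List Int) (commands : List (List Int)) (out : List Int) : Decidable (Spec_solution array commands out) := by unfold Spec_solution; infer_instance

-- ===== CLAIM (what is proved, stated in full; the proofs are below) =====
def Claim_equal_solution : Prop := ∀ (array : List Int) (commands : List (List Int)), Dom_solution array commands → Pre_solution array commands → Spec_solution array commands (solution array commands)

-- ===== LEMMAS AND PROOFS =====

-- last element of the k-smallest prefix = the (k-1)-th element of the sorted list
lemma takeLast_eq (s : List Int) (k : Int)
    (h1 : 1 ≤ k) (h2 : k ≤ (s.length : Int)) :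
    PySem.List.pyGetD (s.take k.toNat) (-1) 0 = PySem.List.pyGetD s (k - 1) 0 := by
  set j : Nat := k.toNat - 1 with hj
  have hjlt : j < s.length := by omega
  have htn : k.toNat = j + 1 := by omega
  have htake : s.take (j + 1) = s.take j ++ [s[j]] := by
    rw [List.take_add_one]; simp [List.getElem?_eq_getElem hjlt]
  rw [htn, htake, PySem.List.pyGetD_neg_one_append_singleton]
  have hge : (0 : Int) ≤ k - 1 := by omega
  have hlt : k - 1 < (s.length : Int) := by omega
  rw [PySem.List.pyGetD_eq_getElem s (i := k - 1) 0 hge hlt]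
  congr 1
  omega

-- the per-command value computed by A equals the one computed by B
lemma cmd_eq (array : List Int) (c : List Int)
    (h1 : 1 ≤ PySem.List.pyGetD c 2 0)
    (h2 : PySem.List.pyGetD c 2 0 ≤ ((PySem.List.slice array (some (PySem.List.pyGetD c 0 0 - 1))
            (some (PySem.List.pyGetD c 1 0))).length : Int)) :
    PySem.List.pyGetD
        (PySem.List.sorted (PySem.List.slice array (some (PySem.List.pyGetD c 0 0 - 1))
            (some (PySem.List.pyGetD c 1 0))) (fun x => x) false)
        (PySem.List.pyGetD c 2 0 - 1) 0
      = PySem.List.pyGetD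
          (nsmallestInt (PySem.List.pyGetD c 2 0)
            (PySem.List.slice array (some (PySem.List.pyGetD c 0 0 - 1))
                                    (some (PySem.List.pyGetD c 1 0)))) (-1) 0 := by
  simp only [nsmallestInt]
  set sliced := PySem.List.slice array (some (PySem.List.pyGetD c 0 0 - 1))
                                       (some (PySem.List.pyGetD c 1 0)) with hsl
  set s := PySem.List.sorted sliced (fun x => x) false with hs
  have hlen : s.length = sliced.length := PySem.List.length_sorted ..
  rw [takeLast_eq s (PySem.List.pyGetD c 2 0) h1 (by rw [hlen]; exact h2)]

-- unrolling A's fold: the array component is reset to tmp after every step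
lemma foldA_eq (tmp : List Int) (cs : List (List Int)) (acc : List Int)
    (h : ∀ c ∈ cs, 1 ≤ PySem.List.pyGetD c 2 0 ∧
      PySem.List.pyGetD c 2 0 ≤ ((PySem.List.slice tmp (some (PySem.List.pyGetD c 0 0 - 1))
            (some (PySem.List.pyGetD c 1 0))).length : Int)) :
    (cs.foldl (fun (st : List Int × List Int) command =>
      let arr := PySem.List.slice st.2 (some (PySem.List.pyGetD command 0 0 - 1))
                                       (some (PySem.List.pyGetD command 1 0))
      let arr := PySem.List.sorted arr (fun x => x) false
      let answer := st.1 ++ [PySem.List.pyGetD arr (PySem.List.pyGetD command 2 0 - 1) 0]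
      (answer, tmp)) (acc, tmp)).1
    = acc ++ cs.map (fun c =>
        PySem.List.pyGetD
          (nsmallestInt (PySem.List.pyGetD c 2 0)
            (PySem.List.slice tmp (some (PySem.List.pyGetD c 0 0 - 1))
                                  (some (PySem.List.pyGetD c 1 0)))) (-1) 0) := by
  induction cs generalizing acc with
  | nil => simp
  | cons c cs ih =>
    simp only [List.foldl_cons, List.map_cons]
    rw [ih _ (fun c hc => h c (List.mem_cons_of_mem _ hc))]
    rw [cmd_eq tmp c (h c (List.mem_cons_self ..)).1 (h c (List.mem_cons_self ..)).2]
    simp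

-- ===== VERDICT (by name: the statement is the Claim_ definition above) =====
theorem solution_spec : Claim_equal_solution := by
  intro array commands _ hpre
  show solution array commands = solution_alt array commands
  unfold solution solution_alt
  exact foldA_eq array commands [] (fun c hc => ⟨(hpre c hc).2.1, (hpre c hc).2.2⟩)
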